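-- pv_equiv track=rewrite | github.com/noeasymoney/dq | mainDQPEA_fuzzy.py | selectMachine
-- ===== SOURCE A (Python) =====
-- def selectMachine(mt):#输入机器负载向量 返回最小的机器负载 索引 可能是大于等于1
--     L = len(mt)
--     candidateM = []
--     f = mt[0]
--     index = 0
--     for i in range(1, L):
--         if f > mt[i]:
--             f = mt[i]
--             index = i
--     candidateM.append(index)
--     f = mt[index]
--     for i in range(L):
--         if i == index:
--             continue
--         elif f == mt[i]:
--             candidateM.append(i)
--     return candidateM
-- ===== SOURCE B (Python) =====
-- def selectMachine(mt):
--     best = mt[0]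
--     result = [0]
--     i = 1
--     for v in mt[1:]:
--         if v < best:
--             best = v
--             result = [i]
--         elif v == best:
--             result.append(i)
--         i += 1
--     return result
-- ===== Notes on version B (the rewrite author's own statement) =====
-- stated objective: simpler
-- what changed: Replaced A's two-pass scheme (find min value and first index, then rescan the whole list collecting tied indices while skipping that index) by a single pass that maintains the running min and the list of its indices simultaneously, resetting the list on a strictly smaller element and appending on a tie.
import Mathlib
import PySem

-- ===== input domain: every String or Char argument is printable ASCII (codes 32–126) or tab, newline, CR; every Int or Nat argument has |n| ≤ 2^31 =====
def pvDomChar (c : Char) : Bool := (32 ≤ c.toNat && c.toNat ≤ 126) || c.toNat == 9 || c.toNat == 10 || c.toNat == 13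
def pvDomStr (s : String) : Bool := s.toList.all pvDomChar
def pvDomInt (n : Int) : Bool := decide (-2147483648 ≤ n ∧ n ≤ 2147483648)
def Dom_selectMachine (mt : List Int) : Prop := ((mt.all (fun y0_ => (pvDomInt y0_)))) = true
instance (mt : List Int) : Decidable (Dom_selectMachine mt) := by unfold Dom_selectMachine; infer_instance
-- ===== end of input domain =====

-- B replaces A's two passes (find min+first index, then rescan for ties) by one pass
-- maintaining the running min and its index list; same return value on every non-empty list.

-- ===== PORT A =====
def selectMachine (mt : List Int) : List Int :=
  let L : Int := (mt.length : Int)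
  let f := PySem.List.pyGetD mt 0 0
  let index : Int := 0
  let p := (PySem.List.pyRange 1 L 1).foldl
      (fun (s : Int × Int) i =>
        if s.1 > PySem.List.pyGetD mt i 0 then (PySem.List.pyGetD mt i 0, i) else s)
      (f, index)
  let candidateM : List Int := [p.2]
  let f2 := PySem.List.pyGetD mt p.2 0
  (PySem.List.pyRange 0 L 1).foldl
      (fun acc i =>
        if i = p.2 then acc
        else if f2 = PySem.List.pyGetD mt i 0 then acc ++ [i] else acc)
      candidateM

-- ===== PORT B =====
-- B's loop 'for v in mt[1:]' with counter i, state (best, result)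
def pvAltLoop (best : Int) (res : List Int) (i : Int) : List Int → List Int
  | [] => res
  | v :: vs =>
      if v < best then pvAltLoop v [i] (i + 1) vs
      else if v = best then pvAltLoop best (res ++ [i]) (i + 1) vs
      else pvAltLoop best res (i + 1) vs

def selectMachine_alt (mt : List Int) : List Int :=
  match mt with
  | [] => []          -- unreachable under Pre_: Python B raises IndexError on []
  | m0 :: rest => pvAltLoop m0 [0] 1 rest

-- ===== PRECONDITION & SPEC =====
-- Pre_ excludes only the empty list, on which both A and B raise IndexError at mt[0].
def Pre_selectMachine (mt : List Int) : Prop := mt ≠ []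
instance (mt : List Int) : Decidable (Pre_selectMachine mt) := by unfold Pre_selectMachine; infer_instance
def pvWitness_selectMachine : List Int := ([3, 1, 2, 1] : List Int)
def Spec_selectMachine (mt : List Int) (out : List Int) : Prop := out = selectMachine_alt mt
instance (mt : List Int) (out : List Int) : Decidable (Spec_selectMachine mt out) := by unfold Spec_selectMachine; infer_instance

-- ===== CLAIM (what is proved, stated in full; the proofs are below) =====
def Claim_equal_selectMachine : Prop := ∀ (mt : List Int), Dom_selectMachine mt → Pre_selectMachine mt → Spec_selectMachine mt (selectMachine mt)

-- ===== LEMMAS AND PROOFS =====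

-- generic index-carrying fold, used to bridge A's folds over pyRange to structural recursions
def pvFoldIdx {σ : Type} (g : σ → Int → Int → σ) (s : σ) (i : Int) : List Int → σ
  | [] => s
  | v :: vs => pvFoldIdx g (g s i v) (i + 1) vs

-- A's first pass, structurally
def pvMinIdx (best bi i : Int) : List Int → Int × Int
  | [] => (best, bi)
  | v :: vs => if best > v then pvMinIdx v i (i + 1) vs else pvMinIdx best bi (i + 1) vs

-- A's second pass, structurally (collect indices with value f, skipping index j)
def pvCollectSkip (f j i : Int) : List Int → List Int
  | [] => []
  | v :: vs =>
      if i = j then pvCollectSkip f j (i + 1) vs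
      else if f = v then i :: pvCollectSkip f j (i + 1) vs
      else pvCollectSkip f j (i + 1) vs

-- all indices (from offset i) whose value equals b
def pvCollect (b i : Int) : List Int → List Int
  | [] => []
  | v :: vs => if v = b then i :: pvCollect b (i + 1) vs else pvCollect b (i + 1) vs

lemma pvBridge {σ : Type} (g : σ → Int → Int → σ) (xs : List Int) (d : Int) :
    ∀ (suf pre : List Int), xs = pre ++ suf → ∀ (s : σ),
      (PySem.List.pyRange (pre.length : Int) (xs.length : Int) 1).foldl
        (fun t i => g t i (PySem.List.pyGetD xs i d)) s
      = pvFoldIdx g s (pre.length : Int) suf := by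
  intro suf
  induction suf with
  | nil =>
      intro pre h s; subst h
      simp only [List.append_nil, pvFoldIdx]
      rw [PySem.List.pyRange_one_eq_nil (le_refl _)]
      rfl
  | cons v vs ih =>
      intro pre h s
      have hlt : (pre.length : Int) < (xs.length : Int) := by
        subst h; simp
      rw [PySem.List.pyRange_one_cons hlt]
      simp only [List.foldl_cons]
      have hget : PySem.List.pyGetD xs (pre.length : Int) d = v := by
        subst h
        simp [PySem.List.pyGetD_natCast]
      rw [hget]
      have h2 := ih (pre ++ [v]) (by simp [h]) (g s (pre.length : Int) v)
      simp only [List.length_append, List.length_cons, List.length_nil] at h2 ⊢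
      push_cast at h2 ⊢
      rw [h2]; simp [pvFoldIdx]

lemma pvFoldIdx_minIdx : ∀ (vs : List Int) (f idx i : Int),
    pvFoldIdx (fun (s : Int × Int) i v => if s.1 > v then (v, i) else s) (f, idx) i vs
      = pvMinIdx f idx i vs := by
  intro vs
  induction vs with
  | nil => intro f idx i; rfl
  | cons v vs ih =>
      intro f idx i
      simp only [pvFoldIdx, pvMinIdx]
      by_cases h : f > v <;> simp [h, ih]

lemma pvFoldIdx_collectSkip (f j : Int) : ∀ (vs : List Int) (acc : List Int) (i : Int),
    pvFoldIdx (fun (acc : List Int) i v => if i = j then acc else if f = v then acc ++ [i] else acc) acc i vs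
      = acc ++ pvCollectSkip f j i vs := by
  intro vs
  induction vs with
  | nil => intro acc i; simp [pvFoldIdx, pvCollectSkip]
  | cons v vs ih =>
      intro acc i
      simp only [pvFoldIdx, pvCollectSkip]
      split_ifs with h1 h2 <;> simp [ih]

lemma pvFoldlMinLe : ∀ (vs : List Int) (b : Int), vs.foldl min b ≤ b := by
  intro vs
  induction vs with
  | nil => intro b; simp
  | cons v vs ih =>
      intro b
      simp only [List.foldl_cons]
      exact le_trans (ih (min b v)) (min_le_left _ _)

lemma pvAltLoop_eq : ∀ (vs : List Int) (best : Int) (res : List Int) (i : Int),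
    pvAltLoop best res i vs
      = (if vs.foldl min best = best then res else []) ++ pvCollect (vs.foldl min best) i vs := by
  intro vs
  induction vs with
  | nil => intro best res i; simp [pvAltLoop, pvCollect]
  | cons v vs ih =>
      intro best res i
      simp only [pvAltLoop, List.foldl_cons, pvCollect]
      by_cases h1 : v < best
      · have hm : min best v = v := by omega
        have hle := pvFoldlMinLe vs v
        simp only [if_pos h1, hm, ih v [i] (i + 1)]
        have hne : ¬ (List.foldl min v vs = best) := by omega
        have hvb : ¬ (v = best) := by omega
        by_cases h2 : List.foldl min v vs = v
        · simp [h2, hvb]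
        · have h2' : ¬ (v = List.foldl min v vs) := fun h => h2 h.symm
          simp [hne, h2, h2']
      · by_cases h2 : v = best
        · have hm : min best v = best := by omega
          have hle := pvFoldlMinLe vs best
          simp only [if_neg h1, if_pos h2, hm, ih best (res ++ [i]) (i + 1)]
          by_cases h3 : List.foldl min best vs = best
          · have hv : v = List.foldl min best vs := by omega
            simp [h3, hv]
          · have hv : ¬ (v = List.foldl min best vs) := by omega
            simp [h3, hv]
        · have hm : min best v = best := by omega
          have hle := pvFoldlMinLe vs best
          have hv : ¬ (v = List.foldl min best vs) := by omega
          simp only [if_neg h1, if_neg h2, hm, ih best res (i + 1), if_neg hv]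

lemma pvMinIdx_spec : ∀ (vs : List Int) (best bi i : Int),
    (pvMinIdx best bi i vs).1 = vs.foldl min best ∧
    (((pvMinIdx best bi i vs).2 = bi ∧ vs.foldl min best = best) ∨
      (∃ pre v suf, vs = pre ++ v :: suf ∧
        (pvMinIdx best bi i vs).2 = i + (pre.length : Int) ∧
        v = vs.foldl min best ∧ v < best ∧ ∀ x ∈ pre, vs.foldl min best < x)) := by
  intro vs
  induction vs with
  | nil => intro best bi i; exact ⟨rfl, Or.inl ⟨rfl, rfl⟩⟩
  | cons v vs ih =>
      intro best bi i
      simp only [pvMinIdx, List.foldl_cons]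
      by_cases h1 : best > v
      · have hm : min best v = v := by omega
        rw [if_pos h1, hm]
        obtain ⟨hfst, hrest⟩ := ih v i (i + 1)
        refine ⟨hfst, Or.inr ?_⟩
        rcases hrest with ⟨hj, hfold⟩ | ⟨pre, u, suf, hd, hj, hu, hlt, hall⟩
        · exact ⟨[], v, vs, by simp, by simpa using hj, hfold.symm, h1, by simp⟩
        · refine ⟨v :: pre, u, suf, by simp [hd], ?_, hu, by omega, ?_⟩
          · simp only [List.length_cons]; push_cast; omega
          · intro x hx
            rcases List.mem_cons.mp hx with hx | hx
            · have hle2 := pvFoldlMinLe vs v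
              omega
            · exact hall x hx
      · have hm : min best v = best := by omega
        rw [if_neg h1, hm]
        obtain ⟨hfst, hrest⟩ := ih best bi (i + 1)
        refine ⟨hfst, ?_⟩
        rcases hrest with ⟨hj, hfold⟩ | ⟨pre, u, suf, hd, hj, hu, hlt, hall⟩
        · exact Or.inl ⟨hj, hfold⟩
        · refine Or.inr ⟨v :: pre, u, suf, by simp [hd], ?_, hu, hlt, ?_⟩
          · simp only [List.length_cons]; push_cast; omega
          · intro x hx
            rcases List.mem_cons.mp hx with hx | hx
            · subst hx; omega
            · exact hall x hx

lemma pvCollectSkip_far : ∀ (vs : List Int) (m j i : Int), j < i →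
    pvCollectSkip m j i vs = pvCollect m i vs := by
  intro vs
  induction vs with
  | nil => intro m j i _; rfl
  | cons v vs ih =>
      intro m j i hj
      simp only [pvCollectSkip, pvCollect]
      have h1 : ¬ (i = j) := by omega
      by_cases h2 : m = v
      · simp [h1, h2, ih _ _ _ (by omega : j < i + 1)]
      · have h2' : ¬ (v = m) := fun h => h2 h.symm
        simp [h1, h2, h2', ih _ _ _ (by omega : j < i + 1)]

lemma pvCollectSkip_split : ∀ (pre : List Int) (suf : List Int) (m j i : Int),
    j = i + (pre.length : Int) → (∀ x ∈ pre, m < x) →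
    pvCollectSkip m j i (pre ++ m :: suf) = pvCollect m (j + 1) suf := by
  intro pre
  induction pre with
  | nil =>
      intro suf m j i hj _
      simp only [List.length_nil] at hj
      simp only [List.nil_append, pvCollectSkip]
      rw [if_pos (by omega)]
      rw [pvCollectSkip_far suf m j (i + 1) (by omega)]
      congr 1
      omega
  | cons w pre ih =>
      intro suf m j i hj hall
      simp only [List.cons_append, pvCollectSkip]
      have hw : m < w := hall w (List.mem_cons_self ..)
      have h1 : ¬ (i = j) := by simp only [List.length_cons] at hj; push_cast at hj; omega
      have h2 : ¬ (m = w) := by omega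
      rw [if_neg h1, if_neg h2]
      exact ih suf m j (i + 1) (by simp only [List.length_cons] at hj; push_cast at hj ⊢; omega)
        (fun x hx => hall x (List.mem_cons_of_mem _ hx))

lemma pvCollect_split : ∀ (pre : List Int) (suf : List Int) (m i : Int),
    (∀ x ∈ pre, m < x) →
    pvCollect m i (pre ++ m :: suf) = (i + (pre.length : Int)) :: pvCollect m (i + 1 + (pre.length : Int)) suf := by
  intro pre
  induction pre with
  | nil =>
      intro suf m i _
      simp [pvCollect]
  | cons w pre ih =>
      intro suf m i hall
      have hw : m < w := hall w (List.mem_cons_self ..)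
      have h2 : ¬ (w = m) := by omega
      simp only [List.cons_append, pvCollect, if_neg h2]
      rw [ih suf m (i + 1) (fun x hx => hall x (List.mem_cons_of_mem _ hx))]
      simp only [List.length_cons]
      push_cast
      congr 1
      · omega
      · congr 1
        omega

lemma pvGetD_decomp (P S : List Int) (m d : Int) :
    PySem.List.pyGetD (P ++ m :: S) ((P.length : Nat) : Int) d = m := by
  simp [PySem.List.pyGetD_natCast]

-- ===== VERDICT (by name: the statement is the Claim_ definition above) =====
theorem selectMachine_spec : Claim_equal_selectMachine := by
  intro mt _ hpre
  unfold Spec_selectMachine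
  match mt with
  | [] => exact absurd rfl hpre
  | m0 :: rest =>
    show selectMachine (m0 :: rest) = selectMachine_alt (m0 :: rest)
    unfold selectMachine selectMachine_alt
    have hget0 : PySem.List.pyGetD (m0 :: rest) 0 0 = m0 := PySem.List.pyGetD_zero_cons ..
    simp only [List.length_cons, hget0]
    push_cast
    -- first fold: bridge to pvMinIdx
    have hb1 := pvBridge (fun (s : Int × Int) i v => if s.1 > v then (v, i) else s)
        (m0 :: rest) 0 rest [m0] rfl (m0, 0)
    simp only [List.length_cons, List.length_nil] at hb1
    push_cast at hb1
    rw [hb1, pvFoldIdx_minIdx]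
    set q := pvMinIdx m0 0 1 rest with hq
    obtain ⟨hfst, hrest⟩ := pvMinIdx_spec rest m0 0 1
    rw [← hq] at hfst hrest
    set M := rest.foldl min m0 with hM
    -- decomposition mt = P ++ M :: S with q.2 = P.length and all of P strictly above M
    have hdec : ∃ P S, m0 :: rest = P ++ M :: S ∧ q.2 = (P.length : Int) ∧ ∀ x ∈ P, M < x := by
      rcases hrest with ⟨hj, hfold⟩ | ⟨pre, v, suf, hd, hj, hv, hlt, hall⟩
      · exact ⟨[], rest, by simp [hfold], by simp [hj], by simp⟩
      · refine ⟨m0 :: pre, suf, by simp [hd, hv], ?_, ?_⟩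
        · simp only [List.length_cons]; push_cast; omega
        · intro x hx
          rcases List.mem_cons.mp hx with hx | hx
          · omega
          · exact hall x hx
    obtain ⟨P, S, hPS, hj2, hPall⟩ := hdec
    -- f2 = M
    have hf2 : PySem.List.pyGetD (m0 :: rest) q.2 0 = M := by
      rw [hPS, hj2]; exact pvGetD_decomp P S M 0
    rw [hf2]
    -- second fold: bridge to pvCollectSkip
    have hb2 := pvBridge
        (fun (acc : List Int) i v => if i = q.2 then acc else if M = v then acc ++ [i] else acc)
        (m0 :: rest) 0 (m0 :: rest) [] rfl [q.2]
    simp only [List.length_cons, List.length_nil, Nat.cast_zero] at hb2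
    push_cast at hb2
    rw [hb2, pvFoldIdx_collectSkip]
    -- evaluate A's collectSkip on the decomposition
    have hA : pvCollectSkip M q.2 0 (m0 :: rest) = pvCollect M (q.2 + 1) S := by
      rw [hPS]
      exact pvCollectSkip_split P S M q.2 0 (by omega) hPall
    rw [hA]
    -- B side
    rw [pvAltLoop_eq rest m0 [0] 1, ← hM]
    have hBside : (if M = m0 then ([0] : List Int) else []) ++ pvCollect M 1 rest
        = pvCollect M 0 (m0 :: rest) := by
      simp only [pvCollect]
      by_cases h : m0 = M
      · simp [h]
      · have h' : ¬ (M = m0) := fun hh => h hh.symm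
        simp [h, h']
    rw [hBside, hPS, pvCollect_split P S M 0 hPall]
    simp only [List.singleton_append, zero_add]
    have h9 : q.2 + 1 = 1 + ((P.length : Nat) : Int) := by omega
    rw [h9, hj2]
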